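-- pv_equiv track=rewrite | github.com/SuperInstance/ai-character-integrations | 01-simple-ai-agent/main.py | _bot_response
-- ===== SOURCE A (Python) =====
-- def _bot_response(user_input: str) -> str:
--     """
--     Generate a simple rule-based response.
--
--     Args:
--         user_input: The user's input
--
--     Returns:
--         Rule-based response
--     """
--     user_input_lower = user_input.lower()
--
--     # Simple pattern matching
--     if any(word in user_input_lower for word in ["hello", "hi", "hey"]):
--         return "Hello! I'm your AI assistant. How can I help you today?"
--
--     if any(word in user_input_lower for word in ["bye", "goodbye", "see you"]):
--         return "Goodbye! Feel free to come back anytime you need assistance."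
--
--     if any(word in user_input_lower for word in ["thank", "thanks"]):
--         return "You're welcome! Is there anything else I can help with?"
--
--     if any(word in user_input_lower for word in ["who are you", "what are you"]):
--         return "I'm a simple AI agent with hierarchical memory and intelligent decision routing."
--
--     if "help" in user_input_lower:
--         return "I can help answer questions, remember our conversations, and learn from experience. What would you like to know?"
--
--     # Default response
--     return "I understand your query. I'm processing this using my knowledge base. Could you provide more details so I can give you a better response?"
-- ===== SOURCE B (Python) =====
-- _KEYWORDS = [
--     ("hello", 0), ("hi", 0), ("hey", 0),
--     ("bye", 1), ("goodbye", 1), ("see you", 1),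
--     ("thank", 2), ("thanks", 2),
--     ("who are you", 3), ("what are you", 3),
--     ("help", 4),
-- ]
--
-- _RESPONSES = [
--     "Hello! I'm your AI assistant. How can I help you today?",
--     "Goodbye! Feel free to come back anytime you need assistance.",
--     "You're welcome! Is there anything else I can help with?",
--     "I'm a simple AI agent with hierarchical memory and intelligent decision routing.",
--     "I can help answer questions, remember our conversations, and learn from experience. What would you like to know?",
--     "I understand your query. I'm processing this using my knowledge base. Could you provide more details so I can give you a better response?",
-- ]
--
--
-- def _bot_response(user_input: str) -> str:
--     # One left-to-right scan over the lowered text: at each position, record the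
--     # highest-priority (lowest-index) rule whose keyword starts there; no per-rule
--     # substring searches and no if-chain.
--     text = user_input.lower()
--     best = 5
--     for i in range(len(text)):
--         suffix = text[i:]
--         for kw, rule in _KEYWORDS:
--             if rule < best and suffix.startswith(kw):
--                 best = rule
--     return _RESPONSES[best]
-- ===== Notes on version B (the rewrite author's own statement) =====
-- stated objective: alternative
-- what changed: Instead of A's per-rule if-chain of substring searches, B makes a single left-to-right scan of the lowered text, checking at each position which keywords start there and keeping the lowest rule index hit, then indexes a response table.
import Mathlib
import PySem

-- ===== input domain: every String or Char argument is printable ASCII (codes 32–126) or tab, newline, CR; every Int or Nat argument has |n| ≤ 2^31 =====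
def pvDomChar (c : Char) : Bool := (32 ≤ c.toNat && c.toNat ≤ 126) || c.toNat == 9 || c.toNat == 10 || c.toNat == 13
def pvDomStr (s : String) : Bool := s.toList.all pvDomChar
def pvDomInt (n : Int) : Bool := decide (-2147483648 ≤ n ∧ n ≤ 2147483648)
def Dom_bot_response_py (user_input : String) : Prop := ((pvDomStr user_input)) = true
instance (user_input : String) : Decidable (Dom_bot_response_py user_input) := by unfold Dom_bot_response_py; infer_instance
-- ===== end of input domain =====

-- B replaces the per-rule substring-search if-chain by a single left-to-right scan of the
-- lowered text that keeps the lowest-index rule whose keyword starts at some position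
-- (objective: alternative algorithm, same behaviour).

-- ===== PORT A =====
def bot_response_py (user_input : String) : String :=
  let user_input_lower := PySem.Str.lower user_input
  if (["hello", "hi", "hey"].any (fun word => PySem.Str.isIn word user_input_lower)) then
    "Hello! I'm your AI assistant. How can I help you today?"
  else if (["bye", "goodbye", "see you"].any (fun word => PySem.Str.isIn word user_input_lower)) then
    "Goodbye! Feel free to come back anytime you need assistance."
  else if (["thank", "thanks"].any (fun word => PySem.Str.isIn word user_input_lower)) then
    "You're welcome! Is there anything else I can help with?"
  else if (["who are you", "what are you"].any (fun word => PySem.Str.isIn word user_input_lower)) then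
    "I'm a simple AI agent with hierarchical memory and intelligent decision routing."
  else if PySem.Str.isIn "help" user_input_lower then
    "I can help answer questions, remember our conversations, and learn from experience. What would you like to know?"
  else
    "I understand your query. I'm processing this using my knowledge base. Could you provide more details so I can give you a better response?"

-- ===== PORT B =====
-- Source B's _KEYWORDS table: (keyword, rule-index) pairs
def botKeywords : List (List Char × Nat) :=
  [ ("hello".toList, 0), ("hi".toList, 0), ("hey".toList, 0),
    ("bye".toList, 1), ("goodbye".toList, 1), ("see you".toList, 1),
    ("thank".toList, 2), ("thanks".toList, 2),
    ("who are you".toList, 3), ("what are you".toList, 3),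
    ("help".toList, 4) ]

-- Source B's _RESPONSES table (index 5 = the default response)
def botResponses : List String :=
  [ "Hello! I'm your AI assistant. How can I help you today?",
    "Goodbye! Feel free to come back anytime you need assistance.",
    "You're welcome! Is there anything else I can help with?",
    "I'm a simple AI agent with hierarchical memory and intelligent decision routing.",
    "I can help answer questions, remember our conversations, and learn from experience. What would you like to know?",
    "I understand your query. I'm processing this using my knowledge base. Could you provide more details so I can give you a better response?" ]

-- the inner `for kw, rule in _KEYWORDS` loop at position i (suffix = text[i:] is t.drop i,
-- exact for 0 ≤ i ≤ len; `suffix.startswith(kw)` is PySem.Chars.startswith)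
def botInner (t : List Char) (i : Nat) (ps : List (List Char × Nat)) (b : Nat) : Nat :=
  ps.foldl (fun b p => if p.2 < b ∧ PySem.Chars.startswith (t.drop i) p.1 = true then p.2 else b) b

def bot_response_py_alt (user_input : String) : String :=
  let t := (PySem.Str.lower user_input).toList
  let best := (List.range t.length).foldl (fun b i => botInner t i botKeywords b) 5
  botResponses.getD best ""   -- _RESPONSES[best]; best < 6 always, so plain in-range indexing

-- ===== PRECONDITION & SPEC =====
def Spec_bot_response_py (user_input : String) (out : String) : Prop := out = bot_response_py_alt user_input
instance (user_input : String) (out : String) : Decidable (Spec_bot_response_py user_input out) := by unfold Spec_bot_response_py; infer_instance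

-- ===== CLAIM (what is proved, stated in full; the proofs are below) =====
def Claim_equal_bot_response_py : Prop := ∀ (user_input : String), Dom_bot_response_py user_input → Spec_bot_response_py user_input (bot_response_py user_input)

-- ===== LEMMAS AND PROOFS =====

lemma botInner_le (t : List Char) (i : Nat) : ∀ (ps : List (List Char × Nat)) (b : Nat),
    botInner t i ps b ≤ b := by
  intro ps
  induction ps with
  | nil => intro b; simp [botInner]
  | cons q ps ih =>
    intro b
    simp only [botInner, List.foldl_cons]
    split_ifs with h
    · exact le_trans (ih q.2) (Nat.le_of_lt h.1)
    · exact ih b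

lemma botInner_le_of_mem (t : List Char) (i : Nat) (p : List Char × Nat) :
    ∀ (ps : List (List Char × Nat)) (b : Nat), p ∈ ps →
    PySem.Chars.startswith (t.drop i) p.1 = true → botInner t i ps b ≤ p.2 := by
  intro ps
  induction ps with
  | nil => intro b h; exact absurd h (List.not_mem_nil)
  | cons q ps ih =>
    intro b hmem hsw
    simp only [botInner, List.foldl_cons]
    rcases List.mem_cons.mp hmem with rfl | hmem'
    · split_ifs with h
      · exact botInner_le t i ps p.2
      · have : ¬ p.2 < b := fun hlt => h ⟨hlt, hsw⟩
        exact le_trans (botInner_le t i ps b) (Nat.le_of_not_lt this)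
    · split_ifs with h
      · exact ih q.2 hmem' hsw
      · exact ih b hmem' hsw

lemma botInner_cases (t : List Char) (i : Nat) : ∀ (ps : List (List Char × Nat)) (b : Nat),
    botInner t i ps b = b ∨
      ∃ p ∈ ps, p.2 = botInner t i ps b ∧ PySem.Chars.startswith (t.drop i) p.1 = true := by
  intro ps
  induction ps with
  | nil => intro b; left; simp [botInner]
  | cons q ps ih =>
    intro b
    simp only [botInner, List.foldl_cons]
    split_ifs with h
    · rcases ih q.2 with heq | ⟨p, hp, hval, hsw⟩
      · right; exact ⟨q, List.mem_cons_self, by simpa [botInner] using heq.symm, h.2⟩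
      · right; exact ⟨p, List.mem_cons_of_mem _ hp, hval, hsw⟩
    · rcases ih b with heq | ⟨p, hp, hval, hsw⟩
      · left; exact heq
      · right; exact ⟨p, List.mem_cons_of_mem _ hp, hval, hsw⟩

lemma botOuter_le (t : List Char) : ∀ (is : List Nat) (b : Nat),
    is.foldl (fun b i => botInner t i botKeywords b) b ≤ b := by
  intro is
  induction is with
  | nil => intro b; simp
  | cons i is ih =>
    intro b
    simp only [List.foldl_cons]
    exact le_trans (ih _) (botInner_le t i botKeywords b)

lemma botOuter_le_of_mem (t : List Char) (i : Nat) (p : List Char × Nat) :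
    ∀ (is : List Nat) (b : Nat), i ∈ is → p ∈ botKeywords →
    PySem.Chars.startswith (t.drop i) p.1 = true →
    is.foldl (fun b i => botInner t i botKeywords b) b ≤ p.2 := by
  intro is
  induction is with
  | nil => intro b h; exact absurd h (List.not_mem_nil)
  | cons j is ih =>
    intro b hmem hp hsw
    simp only [List.foldl_cons]
    rcases List.mem_cons.mp hmem with rfl | hmem'
    · exact le_trans (botOuter_le t is _) (botInner_le_of_mem t i p botKeywords b hp hsw)
    · exact ih _ hmem' hp hsw

lemma botOuter_cases (t : List Char) : ∀ (is : List Nat) (b : Nat),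
    is.foldl (fun b i => botInner t i botKeywords b) b = b ∨
      ∃ i ∈ is, ∃ p ∈ botKeywords,
        p.2 = is.foldl (fun b i => botInner t i botKeywords b) b ∧
        PySem.Chars.startswith (t.drop i) p.1 = true := by
  intro is
  induction is with
  | nil => intro b; left; simp
  | cons j is ih =>
    intro b
    simp only [List.foldl_cons]
    rcases ih (botInner t j botKeywords b) with heq | ⟨i, hi, p, hp, hval, hsw⟩
    · rw [heq]
      rcases botInner_cases t j botKeywords b with heq' | ⟨p, hp, hval, hsw⟩
      · left; exact heq'
      · right; exact ⟨j, List.mem_cons_self, p, hp, hval, hsw⟩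
    · right; exact ⟨i, List.mem_cons_of_mem _ hi, p, hp, hval, hsw⟩

-- does some keyword of rule r occur in t?
def ruleHits (t : List Char) (r : Nat) : Prop :=
  ∃ p ∈ botKeywords, p.2 = r ∧ PySem.Chars.isIn p.1 t = true

lemma hits_of_match (t : List Char) (i : Nat) (p : List Char × Nat)
    (hsw : PySem.Chars.startswith (t.drop i) p.1 = true) :
    PySem.Chars.isIn p.1 t = true :=
  (PySem.Chars.exists_prefix_drop_iff_isIn p.1 t).mp
    ⟨i, (PySem.Chars.startswith_iff _ _).mp hsw⟩

lemma match_of_hits (t : List Char) (p : List Char × Nat) (hp : p ∈ botKeywords)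
    (h : PySem.Chars.isIn p.1 t = true) :
    ∃ i ∈ List.range t.length, PySem.Chars.startswith (t.drop i) p.1 = true := by
  obtain ⟨j, hj⟩ := (PySem.Chars.exists_prefix_drop_iff_isIn p.1 t).mpr h
  have hne : p.1 ≠ [] := by fin_cases hp <;> simp
  have hjlt : j < t.length := by
    by_contra hge
    have : t.drop j = [] := List.drop_eq_nil_of_le (Nat.le_of_not_lt hge)
    rw [this] at hj
    exact hne (List.prefix_nil.mp hj)
  exact ⟨j, List.mem_range.mpr hjlt, (PySem.Chars.startswith_iff _ _).mpr hj⟩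

lemma best_le_of_hits (t : List Char) (r : Nat) (h : ruleHits t r) :
    (List.range t.length).foldl (fun b i => botInner t i botKeywords b) 5 ≤ r := by
  obtain ⟨p, hp, hr, hin⟩ := h
  obtain ⟨i, hi, hsw⟩ := match_of_hits t p hp hin
  exact hr ▸ botOuter_le_of_mem t i p (List.range t.length) 5 hi hp hsw

lemma best_hits_or_five (t : List Char) :
    (List.range t.length).foldl (fun b i => botInner t i botKeywords b) 5 = 5 ∨
    ruleHits t ((List.range t.length).foldl (fun b i => botInner t i botKeywords b) 5) := by
  rcases botOuter_cases t (List.range t.length) 5 with heq | ⟨i, _, p, hp, hval, hsw⟩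
  · left; exact heq
  · right; exact ⟨p, hp, hval, hits_of_match t i p hsw⟩

-- A's branch conditions, translated to ruleHits on the lowered char list
lemma cond_iff (lw : String) (r : Nat) :
    ruleHits lw.toList r ↔
      (botKeywords.filter (fun p => p.2 == r)).any
        (fun p => PySem.Chars.isIn p.1 lw.toList) = true := by
  constructor
  · rintro ⟨p, hp, hval, hin⟩
    exact List.any_eq_true.mpr ⟨p, List.mem_filter.mpr ⟨hp, by simp [hval]⟩, hin⟩
  · intro h
    obtain ⟨p, hp, hin⟩ := List.any_eq_true.mp h
    have hmem := List.mem_filter.mp hp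
    exact ⟨p, hmem.1, by simpa using hmem.2, hin⟩

-- ===== VERDICT (by name: the statement is the Claim_ definition above) =====
theorem bot_response_py_spec : Claim_equal_bot_response_py := by
  intro user_input _
  unfold Spec_bot_response_py bot_response_py bot_response_py_alt
  set lw := PySem.Str.lower user_input with hlw
  set t := lw.toList with ht
  set best := (List.range t.length).foldl (fun b i => botInner t i botKeywords b) 5 with hbest
  have hle5 : best ≤ 5 := botOuter_le t (List.range t.length) 5
  -- A's five boolean conditions as ruleHits
  have e0 : (["hello", "hi", "hey"].any (fun word => PySem.Str.isIn word lw)) = true ↔ ruleHits t 0 := by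
    rw [cond_iff lw 0]
    simp [botKeywords]
  have e1 : (["bye", "goodbye", "see you"].any (fun word => PySem.Str.isIn word lw)) = true ↔ ruleHits t 1 := by
    rw [cond_iff lw 1]
    simp [botKeywords]
  have e2 : (["thank", "thanks"].any (fun word => PySem.Str.isIn word lw)) = true ↔ ruleHits t 2 := by
    rw [cond_iff lw 2]
    simp [botKeywords]
  have e3 : (["who are you", "what are you"].any (fun word => PySem.Str.isIn word lw)) = true ↔ ruleHits t 3 := by
    rw [cond_iff lw 3]
    simp [botKeywords]
  have e4 : (PySem.Str.isIn "help" lw) = true ↔ ruleHits t 4 := by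
    rw [cond_iff lw 4]
    simp [botKeywords]
  have hchar : best = 5 ∨ ruleHits t best := by rw [hbest]; exact best_hits_or_five t
  by_cases h0 : ruleHits t 0
  · have hb : best = 0 := Nat.le_zero.mp (by rw [hbest]; exact best_le_of_hits t 0 h0)
    rw [if_pos (e0.mpr h0)]
    show _ = botResponses.getD best ""
    rw [hb]; rfl
  rw [if_neg (fun hc => h0 (e0.mp hc))]
  by_cases h1 : ruleHits t 1
  · have hle : best ≤ 1 := by rw [hbest]; exact best_le_of_hits t 1 h1
    have hb : best = 1 := by
      rcases hchar with h5 | hh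
      · omega
      · have : best = 0 ∨ best = 1 := by omega
        rcases this with h | h
        · rw [h] at hh; exact absurd hh h0
        · exact h
    rw [if_pos (e1.mpr h1)]
    show _ = botResponses.getD best ""
    rw [hb]; rfl
  rw [if_neg (fun hc => h1 (e1.mp hc))]
  by_cases h2 : ruleHits t 2
  · have hle : best ≤ 2 := by rw [hbest]; exact best_le_of_hits t 2 h2
    have hb : best = 2 := by
      rcases hchar with h5 | hh
      · omega
      · have : best = 0 ∨ best = 1 ∨ best = 2 := by omega
        rcases this with h | h | h <;> rw [h] at hh
        · exact absurd hh h0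
        · exact absurd hh h1
        · exact h
    rw [if_pos (e2.mpr h2)]
    show _ = botResponses.getD best ""
    rw [hb]; rfl
  rw [if_neg (fun hc => h2 (e2.mp hc))]
  by_cases h3 : ruleHits t 3
  · have hle : best ≤ 3 := by rw [hbest]; exact best_le_of_hits t 3 h3
    have hb : best = 3 := by
      rcases hchar with h5 | hh
      · omega
      · have : best = 0 ∨ best = 1 ∨ best = 2 ∨ best = 3 := by omega
        rcases this with h | h | h | h <;> rw [h] at hh
        · exact absurd hh h0
        · exact absurd hh h1
        · exact absurd hh h2
        · exact h
    rw [if_pos (e3.mpr h3)]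
    show _ = botResponses.getD best ""
    rw [hb]; rfl
  rw [if_neg (fun hc => h3 (e3.mp hc))]
  by_cases h4 : ruleHits t 4
  · have hle : best ≤ 4 := by rw [hbest]; exact best_le_of_hits t 4 h4
    have hb : best = 4 := by
      rcases hchar with h5 | hh
      · omega
      · have : best = 0 ∨ best = 1 ∨ best = 2 ∨ best = 3 ∨ best = 4 := by omega
        rcases this with h | h | h | h | h <;> rw [h] at hh
        · exact absurd hh h0
        · exact absurd hh h1
        · exact absurd hh h2
        · exact absurd hh h3
        · exact h
    rw [if_pos (e4.mpr h4)]
    show _ = botResponses.getD best ""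
    rw [hb]; rfl
  rw [if_neg (fun hc => h4 (e4.mp hc))]
  have hb : best = 5 := by
    rcases hchar with h5 | hh
    · exact h5
    · exfalso
      obtain ⟨p, hp, hval, hin⟩ := hh
      have hle4 : p.2 ≤ 4 := by fin_cases hp <;> simp
      have hcases : best = 0 ∨ best = 1 ∨ best = 2 ∨ best = 3 ∨ best = 4 := by omega
      rcases hcases with h | h | h | h | h
      · exact h0 ⟨p, hp, hval.trans h, hin⟩
      · exact h1 ⟨p, hp, hval.trans h, hin⟩
      · exact h2 ⟨p, hp, hval.trans h, hin⟩
      · exact h3 ⟨p, hp, hval.trans h, hin⟩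
      · exact h4 ⟨p, hp, hval.trans h, hin⟩
  show _ = botResponses.getD best ""
  rw [hb]; rfl
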